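-- pv_equiv track=rewrite | github.com/vladleng/midi-captain-max | firmware/dev/code.py | _extract_last_number
-- ===== SOURCE A (Python) =====
-- def _extract_last_number(text):
--     """Extract the last integer from a string. Returns None if not found."""
--     num_str = ""
--     found = None
--     for c in text:
--         if '0' <= c <= '9':
--             num_str += c
--         else:
--             if num_str:
--                 found = int(num_str)
--                 num_str = ""
--     if num_str:
--         found = int(num_str)
--     return found
-- ===== SOURCE B (Python) =====
-- def _extract_last_number(text):
--     """Extract the last integer from a string. Returns None if not found.
--
--     Backward scan: reverse once, skip non-digits, take the digit run, convert.
--     """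
--     rev = text[::-1]
--     n = len(rev)
--     k = 0
--     while k < n and not ('0' <= rev[k] <= '9'):
--         k += 1
--     if k == n:
--         return None
--     m = k
--     while m < n and '0' <= rev[m] <= '9':
--         m += 1
--     return int(rev[k:m][::-1])
-- ===== Notes on version B (the rewrite author's own statement) =====
-- stated objective: alternative
-- what changed: Replaces A's forward state machine that accumulates and flushes every digit run with a backward scan that reverses the string once, skips trailing non-digits, takes the single last digit run and converts only it.
import Mathlib
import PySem

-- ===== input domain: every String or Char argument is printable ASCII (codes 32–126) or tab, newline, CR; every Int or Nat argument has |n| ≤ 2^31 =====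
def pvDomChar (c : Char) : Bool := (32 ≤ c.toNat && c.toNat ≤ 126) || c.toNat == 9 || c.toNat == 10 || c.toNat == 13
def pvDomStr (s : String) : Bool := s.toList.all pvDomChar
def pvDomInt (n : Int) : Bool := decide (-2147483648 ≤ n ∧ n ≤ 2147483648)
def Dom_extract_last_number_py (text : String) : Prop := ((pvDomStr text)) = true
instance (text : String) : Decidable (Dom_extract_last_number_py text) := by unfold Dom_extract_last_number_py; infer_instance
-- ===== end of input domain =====

-- B replaces A's forward digit-accumulation state machine by a backward scan that
-- finds only the LAST digit run (objective: alternative algorithm, same asymptotic cost).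

-- '0' <= c <= '9'
def pvDig (c : Char) : Bool := decide ('0' ≤ c ∧ c ≤ '9')

-- ===== PORT A =====
-- loop body: state = (num_str, found)
def pvStepA (s : List Char × Option Int) (c : Char) : List Char × Option Int :=
  if pvDig c then (s.1 ++ [c], s.2)
  else if s.1 ≠ [] then ([], PySem.Int.ofChars? s.1)  -- int(num_str): num_str is a nonempty digit run, so ofChars? = some (int value)
  else s

def extract_last_number_py (text : String) : Option Int :=
  let r := text.toList.foldl pvStepA ([], none)
  if r.1 ≠ [] then PySem.Int.ofChars? r.1 else r.2

-- ===== PORT B =====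
def extract_last_number_py_alt (text : String) : Option Int :=
  let rev := text.toList.reverse                       -- rev = text[::-1] (per code point, exact)
  let rest := rev.dropWhile (fun c => !pvDig c)        -- first while loop: advance k past non-digits
  if rest = [] then none                               -- k == n
  else PySem.Int.ofChars? ((rest.takeWhile pvDig).reverse)  -- second loop takes rev[k:m]; int(rev[k:m][::-1])

-- ===== PRECONDITION & SPEC =====
def Spec_extract_last_number_py (text : String) (out : Option Int) : Prop := out = extract_last_number_py_alt text
instance (text : String) (out : Option Int) : Decidable (Spec_extract_last_number_py text out) := by unfold Spec_extract_last_number_py; infer_instance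

-- ===== CLAIM (what is proved, stated in full; the proofs are below) =====
def Claim_equal_extract_last_number_py : Prop := ∀ (text : String), Dom_extract_last_number_py text → Spec_extract_last_number_py text (extract_last_number_py text)

-- ===== LEMMAS AND PROOFS =====

-- B's core on an already-reversed char list
def pvG (r : List Char) : Option Int :=
  let rest := r.dropWhile (fun c => !pvDig c)
  if rest = [] then none
  else PySem.Int.ofChars? ((rest.takeWhile pvDig).reverse)

theorem pvG_cons_nondig (c : Char) (r : List Char) (hc : pvDig c = false) :
    pvG (c :: r) = pvG r := by
  simp [pvG, List.dropWhile, hc]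

-- flushing A's pending digit run agrees with B's core
theorem pvKey (rev : List Char) :
    (if (rev.takeWhile pvDig).reverse ≠ [] then PySem.Int.ofChars? (rev.takeWhile pvDig).reverse
     else pvG (rev.dropWhile pvDig)) = pvG rev := by
  cases rev with
  | nil => simp [pvG]
  | cons c r =>
    by_cases hc : pvDig c = true
    · simp [pvG, List.takeWhile, List.dropWhile, hc]
    · simp only [Bool.not_eq_true] at hc
      simp [List.takeWhile, List.dropWhile, hc, pvG_cons_nondig c r hc]

-- loop invariant for A's fold: pending run = trailing digit run, found = B's core on the rest
theorem pvInv (l : List Char) :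
    l.foldl pvStepA ([], none) =
      ((l.reverse.takeWhile pvDig).reverse, pvG (l.reverse.dropWhile pvDig)) := by
  induction l using List.reverseRecOn with
  | nil => simp [pvG]
  | append_singleton l c ih =>
    rw [List.foldl_append, ih]
    by_cases hc : pvDig c = true
    · simp [pvStepA, hc]
    · simp only [Bool.not_eq_true] at hc
      simp only [List.reverse_append, List.reverse_cons, List.reverse_nil, List.nil_append,
        List.singleton_append, List.takeWhile, List.dropWhile, hc,
        pvG_cons_nondig c l.reverse hc, List.foldl_cons, List.foldl_nil]
      rw [← pvKey l.reverse]
      by_cases h : (List.takeWhile pvDig l.reverse).reverse = []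
      · simp [pvStepA, hc, h]
      · simp [pvStepA, hc, h]

-- ===== VERDICT (by name: the statement is the Claim_ definition above) =====
theorem extract_last_number_py_spec : Claim_equal_extract_last_number_py := by
  intro text _
  show extract_last_number_py text = extract_last_number_py_alt text
  unfold extract_last_number_py extract_last_number_py_alt
  rw [pvInv text.toList]
  exact pvKey text.toList.reverse
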